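-- pv_equiv track=rewrite | github.com/br-adriel/class-ai | reinforcement/ticbot.py | highest_win_options
-- ===== SOURCE A (Python) =====
-- def highest_win_options(values: list[str],
--                         lookup_keys: list[str],
--                         player_symbol: str = 'o') -> list[str]:
--     """Returns a list which contains the best keys for a win in the game"""
--
--     highest_win: int = -1
--     highest_win_keys: list[str] = []
--
--     for key in lookup_keys:
--         wins = values[key][player_symbol]
--         if wins == highest_win:
--             highest_win = wins
--             highest_win_keys.append(key)
--         elif wins > highest_win:
--             highest_win = wins
--             highest_win_keys = [key]
--
--     return highest_win_keys
-- ===== SOURCE B (Python) =====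
-- def highest_win_options(values: list[str],
--                         lookup_keys: list[str],
--                         player_symbol: str = 'o') -> list[str]:
--     """Returns a list which contains the best keys for a win in the game"""
--     best = max([-1, *(values[k][player_symbol] for k in lookup_keys)])
--     return [k for k in lookup_keys if values[k][player_symbol] == best]
-- ===== Notes on version B (the rewrite author's own statement) =====
-- stated objective: simpler
-- what changed: Replaces the single loop that tracks a running maximum and rebuilds/extends the key list on the fly with two plain passes: one max() reduction seeded with -1 to find the best win count, then one filter collecting the keys that achieve it.
import Mathlib
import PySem

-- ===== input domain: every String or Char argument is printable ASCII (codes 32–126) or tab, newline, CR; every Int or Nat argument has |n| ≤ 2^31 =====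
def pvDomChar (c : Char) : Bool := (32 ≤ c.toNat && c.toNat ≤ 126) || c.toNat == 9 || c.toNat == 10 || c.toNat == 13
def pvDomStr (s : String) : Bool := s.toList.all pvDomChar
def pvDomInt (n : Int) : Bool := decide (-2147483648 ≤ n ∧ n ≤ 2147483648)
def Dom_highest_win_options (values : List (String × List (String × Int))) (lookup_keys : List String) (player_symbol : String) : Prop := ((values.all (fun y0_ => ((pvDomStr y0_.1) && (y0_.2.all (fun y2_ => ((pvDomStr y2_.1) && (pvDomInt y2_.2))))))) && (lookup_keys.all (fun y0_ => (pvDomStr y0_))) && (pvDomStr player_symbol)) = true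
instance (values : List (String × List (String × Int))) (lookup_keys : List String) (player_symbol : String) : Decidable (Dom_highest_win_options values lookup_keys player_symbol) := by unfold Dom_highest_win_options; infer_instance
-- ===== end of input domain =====

-- B replaces A's single max-tracking loop (running best + rebuilt key list) by a max() reduction
-- seeded with -1 followed by a filter pass; same return value, objective: simpler.

-- ===== PORT A =====
-- wins = values[key][player_symbol]; the .getD 0 default is never taken under Pre_ (Python raises KeyError there)
def pvWins (values : List (String × List (String × Int))) (player_symbol : String) (key : String) : Int :=
  (((PySem.Dict.mk values).get? key).bind (fun d => (PySem.Dict.mk d).get? player_symbol)).getD 0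

def highest_win_options (values : List (String × List (String × Int))) (lookup_keys : List String) (player_symbol : String) : List String :=
  (lookup_keys.foldl (fun st key =>
      let wins := pvWins values player_symbol key
      if wins = st.1 then (wins, st.2 ++ [key])
      else if st.1 < wins then (wins, [key])
      else st) ((-1 : Int), ([] : List String))).2

-- ===== PORT B =====
def highest_win_options_alt (values : List (String × List (String × Int))) (lookup_keys : List String) (player_symbol : String) : List String :=
  let best := lookup_keys.foldl (fun a k => max a (pvWins values player_symbol k)) (-1 : Int)
  lookup_keys.filter (fun k => pvWins values player_symbol k == best)

-- ===== PRECONDITION & SPEC =====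
-- Pre_ excludes exactly the inputs where Python A raises KeyError: a lookup key absent from
-- `values`, or `player_symbol` absent from that key's inner dict.
def Pre_highest_win_options (values : List (String × List (String × Int))) (lookup_keys : List String) (player_symbol : String) : Prop :=
  ∀ key ∈ lookup_keys,
    (((PySem.Dict.mk values).get? key).bind (fun d => (PySem.Dict.mk d).get? player_symbol)).isSome = true
instance (values : List (String × List (String × Int))) (lookup_keys : List String) (player_symbol : String) : Decidable (Pre_highest_win_options values lookup_keys player_symbol) := by unfold Pre_highest_win_options; infer_instance

def pvWitness_highest_win_options : (List (String × List (String × Int))) × List String × String :=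
  ([("a", [("o", 2), ("x", 1)]), ("b", [("o", 2)])], ["a", "b"], "o")

def Spec_highest_win_options (values : List (String × List (String × Int))) (lookup_keys : List String) (player_symbol : String) (out : List String) : Prop := out = highest_win_options_alt values lookup_keys player_symbol
instance (values : List (String × List (String × Int))) (lookup_keys : List String) (player_symbol : String) (out : List String) : Decidable (Spec_highest_win_options values lookup_keys player_symbol out) := by unfold Spec_highest_win_options; infer_instance

-- ===== CLAIM (what is proved, stated in full; the proofs are below) =====
def Claim_equal_highest_win_options : Prop := ∀ (values : List (String × List (String × Int))) (lookup_keys : List String) (player_symbol : String), Dom_highest_win_options values lookup_keys player_symbol → Pre_highest_win_options values lookup_keys player_symbol → Spec_highest_win_options values lookup_keys player_symbol (highest_win_options values lookup_keys player_symbol)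

-- ===== LEMMAS AND PROOFS =====

theorem le_foldl_max (g : String → Int) (ks : List String) (h : Int) :
    h ≤ ks.foldl (fun a k => max a (g k)) h := by
  induction ks generalizing h with
  | nil => simp
  | cons k ks ih =>
    simp only [List.foldl_cons]
    exact le_trans (le_max_left _ _) (ih (max h (g k)))

theorem loopA (g : String → Int) (ks : List String) (h : Int) (acc : List String) :
    (ks.foldl (fun st key =>
        let wins := g key
        if wins = st.1 then (wins, st.2 ++ [key])
        else if st.1 < wins then (wins, [key])
        else st) (h, acc))
    = (ks.foldl (fun a k => max a (g k)) h,
       (if ks.foldl (fun a k => max a (g k)) h = h then acc else [])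
         ++ ks.filter (fun k => g k == ks.foldl (fun a k => max a (g k)) h)) := by
  induction ks generalizing h acc with
  | nil => simp
  | cons k ks ih =>
    simp only [List.foldl_cons, List.filter_cons]
    by_cases h1 : g k = h
    · subst h1
      simp only [max_self]
      rw [ih]
      by_cases h2 : ks.foldl (fun a k => max a (g k)) (g k) = g k
      · simp [h2]
      · have h2' : ¬ g k = ks.foldl (fun a k => max a (g k)) (g k) := fun e => h2 e.symm
        simp [h2, h2']
    · rw [if_neg h1]
      by_cases h3 : h < g k
      · rw [if_pos h3]
        simp only [max_eq_right (le_of_lt h3)]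
        rw [ih]
        have hM : g k ≤ ks.foldl (fun a k => max a (g k)) (g k) := le_foldl_max g ks (g k)
        have hMh : ks.foldl (fun a k => max a (g k)) (g k) ≠ h := by
          intro e; rw [e] at hM; omega
        by_cases h4 : ks.foldl (fun a k => max a (g k)) (g k) = g k
        · simp [h4, h1]
        · have : ¬ (g k == ks.foldl (fun a k => max a (g k)) (g k)) = true := by
            simp [beq_iff_eq]; intro e; exact h4 e.symm
          simp [h4, hMh, this]
      · rw [if_neg h3]
        have hgk : g k < h := lt_of_le_of_ne (not_lt.mp h3) h1
        simp only [max_eq_left (le_of_lt hgk)]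
        rw [ih]
        have hM : h ≤ ks.foldl (fun a k => max a (g k)) h := le_foldl_max g ks h
        have : ¬ (g k == ks.foldl (fun a k => max a (g k)) h) = true := by
          simp [beq_iff_eq]; intro e; omega
        simp [this]

-- ===== VERDICT (by name: the statement is the Claim_ definition above) =====
theorem highest_win_options_spec : Claim_equal_highest_win_options := by
  intro values lookup_keys player_symbol _ _
  show _ = _
  unfold highest_win_options highest_win_options_alt
  rw [loopA (pvWins values player_symbol) lookup_keys (-1) []]
  simp
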